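-- pv_equiv track=rewrite | github.com/FergusonAJ/quantifying_evolvability | nk_landscapes/genotype_fitness_calc.py | generate_interactions
-- ===== SOURCE A (Python) =====
-- def generate_interactions(N, K):
--     """
--     Generates a table of dependencies for each gene.
--     Each gene is influenced by itself and K neighbors.
--     """
--     interactions = []
--     for i in range(N):
--         indices = []
--         for j in range(K + 1):
--             # Read from right to left (bit 0 is far right, bit 1 is one to the left, etc)
--             first_index = N - (1 + i + K)
--             index = (first_index + j) % N
--             indices.append(index)
--         interactions.append(indices)
--     return interactions
-- ===== SOURCE B (Python) =====
-- def generate_interactions(N, K):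
--     """
--     Generates a table of dependencies for each gene.
--     Each gene is influenced by itself and K neighbors.
--     """
--     if N <= 0:
--         return []
--     m = max(K + 1, 0)
--     # Precompute the cyclic index buffer once; each row is a contiguous slice.
--     cyclic = list(range(N)) * (m // N + 2)
--     return [cyclic[s:s + m] for s in ((N - 1 - i - K) % N for i in range(N))]
-- ===== Notes on version B (the rewrite author's own statement) =====
-- stated objective: faster
-- what changed: Replaces A's per-element modular arithmetic in a nested Python loop by a cyclic index buffer precomputed once and one contiguous bulk slice per gene.
import Mathlib
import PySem

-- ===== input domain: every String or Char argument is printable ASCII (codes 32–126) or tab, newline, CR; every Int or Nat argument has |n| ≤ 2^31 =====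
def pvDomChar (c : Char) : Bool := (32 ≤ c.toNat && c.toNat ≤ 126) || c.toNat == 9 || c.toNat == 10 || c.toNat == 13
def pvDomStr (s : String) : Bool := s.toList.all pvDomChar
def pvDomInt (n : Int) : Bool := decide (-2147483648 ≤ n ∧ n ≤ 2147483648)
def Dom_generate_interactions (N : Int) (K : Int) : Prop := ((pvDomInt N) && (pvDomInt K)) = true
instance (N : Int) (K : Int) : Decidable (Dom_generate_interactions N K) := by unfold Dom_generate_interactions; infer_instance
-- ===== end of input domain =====

-- B replaces A's per-element modular arithmetic by one precomputed cyclic index buffer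
-- plus a contiguous slice per gene (objective: alternative data-structure formulation).


-- ===== PORT A =====
-- literal transliteration of A: outer loop over range(N), inner loop over range(K+1),
-- appending (N - (1 + i + K) + j) % N each step
def generate_interactions (N : Int) (K : Int) : List (List Int) :=
  (PySem.List.pyRange 0 N 1).foldl (fun interactions i =>
    interactions ++ [(PySem.List.pyRange 0 (K + 1) 1).foldl (fun indices j =>
      indices ++ [PySem.Int.mod (N - (1 + i + K) + j) N]) []]) []

-- ===== PORT B =====
-- literal transliteration of Source B: guard N ≤ 0, precompute the repeated cyclic buffer
-- (list(range(N)) * (m // N + 2) is pyRepeat), one slice per gene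
def generate_interactions_alt (N : Int) (K : Int) : List (List Int) :=
  if N ≤ 0 then []
  else
    let m : Int := max (K + 1) 0
    let cyclic := PySem.List.pyRepeat (PySem.List.pyRange 0 N 1) (PySem.Int.floordiv m N + 2)
    (PySem.List.pyRange 0 N 1).map (fun i =>
      let s := PySem.Int.mod (N - 1 - i - K) N
      PySem.List.slice cyclic (some s) (some (s + m)))

-- ===== PRECONDITION & SPEC =====
def Spec_generate_interactions (N : Int) (K : Int) (out : List (List Int)) : Prop := out = generate_interactions_alt N K
instance (N : Int) (K : Int) (out : List (List Int)) : Decidable (Spec_generate_interactions N K out) := by unfold Spec_generate_interactions; infer_instance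

-- ===== CLAIM (what is proved, stated in full; the proofs are below) =====
def Claim_equal_generate_interactions : Prop := ∀ (N : Int) (K : Int), Dom_generate_interactions N K → Spec_generate_interactions N K (generate_interactions N K)

-- ===== LEMMAS AND PROOFS =====

-- element p of r concatenated copies of range n is p % n
lemma flatten_replicate_range_getElem? (n : Nat) :
    ∀ (r p : Nat), p < r * n → ((List.replicate r (List.range n)).flatten)[p]? = some (p % n) := by
  intro r
  induction r with
  | zero => intro p hp; simp at hp
  | succ r ih =>
    intro p hp
    have hlen : (List.range n).length = n := List.length_range ..
    have hrn : (r + 1) * n = r * n + n := by ring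
    rw [List.replicate_succ, List.flatten_cons]
    by_cases h : p < n
    · rw [List.getElem?_append_left (by omega)]
      simp [List.getElem?_range h, Nat.mod_eq_of_lt h]
    · rw [List.getElem?_append_right (by omega), hlen]
      rw [ih (p - n) (by omega)]
      congr 1
      conv_rhs => rw [Nat.mod_eq_sub_mod (by omega)]

-- a window of the repeated range, as a map over range
lemma flatten_replicate_range_window (n r s t : Nat) (h : s + t ≤ r * n) :
    (((List.replicate r (List.range n)).flatten.drop s).take t)
      = (List.range t).map (fun j => (s + j) % n) := by
  apply List.ext_getElem?
  intro k
  by_cases hk : k < t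
  · rw [List.getElem?_take_of_lt hk, List.getElem?_drop]
    rw [flatten_replicate_range_getElem? n r (s + k) (by omega)]
    simp [List.getElem?_range hk]
  · rw [List.getElem?_take, if_neg hk]
    symm
    apply List.getElem?_eq_none
    simp; omega

-- one row: the slice of the cyclic buffer equals A's inner loop result
lemma row_eq (N K i : Int) (hN : 0 < N) :
    PySem.List.slice
        (PySem.List.pyRepeat (PySem.List.pyRange 0 N 1)
          (PySem.Int.floordiv (max (K + 1) 0) N + 2))
        (some (PySem.Int.mod (N - 1 - i - K) N))
        (some (PySem.Int.mod (N - 1 - i - K) N + max (K + 1) 0))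
      = (PySem.List.pyRange 0 (K + 1) 1).map
          (fun j => PySem.Int.mod (N - (1 + i + K) + j) N) := by
  set s : Int := PySem.Int.mod (N - 1 - i - K) N with hs_def
  set m : Int := max (K + 1) 0 with hm_def
  have hs0 : 0 ≤ s := PySem.Int.mod_nonneg _ hN
  have hsN : s < N := PySem.Int.mod_lt _ hN
  have hm0 : 0 ≤ m := le_max_right _ _
  set c : Int := PySem.Int.floordiv m N + 2 with hc_def
  have hq0 : 0 ≤ PySem.Int.floordiv m N := by
    rw [PySem.Int.floordiv_eq_ediv_of_pos hN]; exact Int.ediv_nonneg hm0 hN.le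
  have hc0 : 0 ≤ c := by omega
  have hdm := PySem.Int.floordiv_mul_add_mod m N
  have hmm0 : 0 ≤ PySem.Int.mod m N := PySem.Int.mod_nonneg _ hN
  have hmmN : PySem.Int.mod m N < N := PySem.Int.mod_lt _ hN
  have hcN : c * N = PySem.Int.floordiv m N * N + 2 * N := by ring
  have hInt : s + m ≤ c * N := by omega
  have hb : s.toNat + m.toNat ≤ c.toNat * N.toNat := by
    have hcast : ((c.toNat * N.toNat : Nat) : Int) = c * N := by
      push_cast [Int.toNat_of_nonneg hc0, Int.toNat_of_nonneg hN.le]; ring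
    omega
  rw [PySem.List.slice_toNat _ hs0 (by omega)]
  have htsub : (s + m).toNat - s.toNat = m.toNat := by omega
  rw [htsub]
  show (List.take m.toNat (List.drop s.toNat
      (PySem.List.pyRepeat (PySem.List.pyRange 0 N) c))) = _
  have hbuf : PySem.List.pyRepeat (PySem.List.pyRange 0 N) c
      = ((List.replicate c.toNat (List.range N.toNat)).flatten).map (fun k : Nat => (k : Int)) := by
    show (List.replicate c.toNat (PySem.List.pyRange 0 N)).flatten = _
    rw [PySem.List.pyRange_one 0 N, List.map_flatten, List.map_replicate]
    norm_num
  rw [hbuf, ← List.map_drop, ← List.map_take,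
    flatten_replicate_range_window N.toNat c.toNat s.toNat m.toNat hb,
    List.map_map, PySem.List.pyRange_one 0 (K + 1), List.map_map]
  have hrange : (K + 1 - 0).toNat = m.toNat := by omega
  rw [hrange]
  apply List.map_congr_left
  intro j _
  show ((s.toNat + j) % N.toNat : Nat) = PySem.Int.mod (N - (1 + i + K) + (0 + (j : Int))) N
  rw [PySem.Int.mod_eq_emod_of_pos hN]
  push_cast [Int.natCast_mod, Int.toNat_of_nonneg hs0, Int.toNat_of_nonneg hN.le]
  rw [hs_def, PySem.Int.mod_eq_emod_of_pos hN, Int.emod_add_emod]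
  congr 1
  ring

theorem generate_interactions_eq (N K : Int) :
    generate_interactions N K = generate_interactions_alt N K := by
  unfold generate_interactions generate_interactions_alt
  by_cases hN : N ≤ 0
  · rw [if_pos hN, PySem.List.pyRange_one_eq_nil (a := 0) (b := N) hN]
    rfl
  · rw [if_neg hN]
    rw [PySem.List.foldl_append_singleton_eq_map
      (fun i => (PySem.List.pyRange 0 (K + 1) 1).foldl (fun indices j =>
        indices ++ [PySem.Int.mod (N - (1 + i + K) + j) N]) []) _ []]
    rw [List.nil_append]
    apply List.map_congr_left
    intro i _
    rw [PySem.List.foldl_append_singleton_eq_map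
      (fun j => PySem.Int.mod (N - (1 + i + K) + j) N) _ []]
    rw [List.nil_append, row_eq N K i (by omega)]

-- ===== VERDICT (by name: the statement is the Claim_ definition above) =====
theorem generate_interactions_spec : Claim_equal_generate_interactions := by
  intro N K _
  unfold Spec_generate_interactions
  exact generate_interactions_eq N K
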